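-- pv_equiv track=rewrite | github.com/dddy111/relation_equivalence | relation_equivlence.py | equivalence_closure
-- ===== SOURCE A (Python) =====
-- from typing import List, Set
--
-- N = 5
--
-- def reflexive_closure(R: List[List[int]]) -> List[List[int]]:
--     C = [row[:] for row in R]
--     for i in range(N):
--         C[i][i] = 1
--     return C
--
-- def symmetric_closure(R: List[List[int]]) -> List[List[int]]:
--     C = [row[:] for row in R]
--     for i in range(N):
--         for j in range(N):
--             if R[i][j] == 1 or R[j][i] == 1:
--                 C[i][j] = 1
--                 C[j][i] = 1
--     return C
--
-- def transitive_closure(R: List[List[int]]) -> List[List[int]]: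
--     # Warshall 알고리즘
--     C = [row[:] for row in R]
--     for k in range(N):
--         for i in range(N):
--             if C[i][k]:
--                 # 미세 최적화: C[i][k]==1인 경우만 j loop
--                 for j in range(N):
--                     if C[k][j]:
--                         C[i][j] = 1
--     return C
--
-- def equivalence_closure(R: List[List[int]]) -> List[List[int]]:
--     """
--     추가 기능:
--     주어진 관계 R을 반사/대칭/추이 폐포를 모두 적용해 가장 가까운 동치관계로 변환.
--     순서는 반사 → 대칭 → 추이로 1회 적용 후, 필요 시 고정점까지 반복.
--     (대칭/추이 상호작용 때문에 1~2회 반복으로 충분)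
--     """
--     C = [row[:] for row in R]
--     for _ in range(3):  # 안전상 최대 3회 반복
--         before = [row[:] for row in C]
--         C = reflexive_closure(C)
--         C = symmetric_closure(C)
--         C = transitive_closure(C)
--         if C == before:
--             break
--     return C
-- ===== SOURCE B (Python) =====
-- from typing import List
--
-- def equivalence_closure(R: List[List[int]]) -> List[List[int]]:
--     # Per-node reachability: saturate each node's neighbour set over the
--     # symmetrised (truthy) 5x5 edge relation; 4 rounds suffice for 5 nodes.
--     comps = []
--     for i in range(5):
--         seen = [0] * 5
--         seen[i] = 1
--         for _ in range(4):
--             seen = [1 if (seen[j] or any(seen[v] and (R[v][j] or R[j][v])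
--                                          for v in range(5))) else 0
--                     for j in range(5)]
--         comps.append(seen)
--     C = [row[:] for row in R]
--     for i in range(5):
--         for j in range(5):
--             C[i][j] = comps[i][j]
--     return C
-- ===== Notes on version B (the rewrite author's own statement) =====
-- stated objective: alternative
-- what changed: Replaces A's iterated reflexive/symmetric/Warshall fixed-point pipeline by a per-node breadth-first saturation: each node's reachable set over the symmetrised truthy 5x5 edge relation is grown for 4 rounds (enough for 5 nodes) and written back as the component indicator, preserving cells outside the 5x5 block verbatim.
import Mathlib
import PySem

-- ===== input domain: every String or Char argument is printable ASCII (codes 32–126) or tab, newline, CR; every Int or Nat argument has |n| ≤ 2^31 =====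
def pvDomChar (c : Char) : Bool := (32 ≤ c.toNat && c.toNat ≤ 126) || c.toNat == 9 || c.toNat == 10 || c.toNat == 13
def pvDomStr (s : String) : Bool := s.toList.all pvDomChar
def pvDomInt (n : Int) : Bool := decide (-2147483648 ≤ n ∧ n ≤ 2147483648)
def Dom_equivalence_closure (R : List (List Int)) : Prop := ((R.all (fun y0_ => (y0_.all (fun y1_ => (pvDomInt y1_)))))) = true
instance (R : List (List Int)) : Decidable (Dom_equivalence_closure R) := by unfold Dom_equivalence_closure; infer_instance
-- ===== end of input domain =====

-- B replaces A's iterated reflexive/symmetric/Warshall fixed-point pipeline by a per-node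
-- breadth-first saturation over the symmetrised truthy 5x5 edge relation (alternative algorithm,
-- similar cost); equivalence is about the return value (neither program mutates its argument).

-- C[i][j] read: exact under Pre_ (all indices accessed are in range; Python raises otherwise)
def rget (C : List (List Int)) (i : Nat) : List Int := C.getD i []
def mget (C : List (List Int)) (i j : Nat) : Int := (rget C i).getD j 0
-- C[i][j] = v write: exact under Pre_ for the same reason
def mset (C : List (List Int)) (i j : Nat) (v : Int) : List (List Int) :=
  C.set i ((rget C i).set j v)

-- ===== PORT A =====
def reflexive_closure (R : List (List Int)) : List (List Int) :=
  (List.range 5).foldl (fun C i => mset C i i 1) R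

def symmetric_closure (R : List (List Int)) : List (List Int) :=
  (List.range 5).foldl (fun C i =>
    (List.range 5).foldl (fun C j =>
      if mget R i j = 1 ∨ mget R j i = 1 then mset (mset C i j 1) j i 1 else C) C) R

def transInner (k i : Nat) (C : List (List Int)) (js : List Nat) : List (List Int) :=
  js.foldl (fun C j => if mget C k j ≠ 0 then mset C i j 1 else C) C

def transStep (C : List (List Int)) (k : Nat) : List (List Int) :=
  (List.range 5).foldl (fun C i => if mget C i k ≠ 0 then transInner k i C (List.range 5) else C) C

def transitive_closure (R : List (List Int)) : List (List Int) :=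
  (List.range 5).foldl transStep R

def eqBody (C : List (List Int)) : List (List Int) :=
  transitive_closure (symmetric_closure (reflexive_closure C))

def eqLoop : Nat → List (List Int) → List (List Int)
  | 0, C => C
  | n+1, C =>
    let C' := eqBody C
    if C' = C then C' else eqLoop n C'

def equivalence_closure (R : List (List Int)) : List (List Int) := eqLoop 3 R

-- ===== PORT B =====
def bStep (R : List (List Int)) (seen : List Int) : List Int :=
  (List.range 5).map (fun j =>
    if seen.getD j 0 ≠ 0 ∨ ∃ v ∈ List.range 5, seen.getD v 0 ≠ 0 ∧ (mget R v j ≠ 0 ∨ mget R j v ≠ 0)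
    then 1 else 0)

def bSat (R : List (List Int)) (seen : List Int) : List Int :=
  (List.range 4).foldl (fun s _ => bStep R s) seen

def bComps (R : List (List Int)) : List (List Int) :=
  (List.range 5).map (fun i => bSat R ((List.replicate 5 0).set i 1))

def equivalence_closure_alt (R : List (List Int)) : List (List Int) :=
  (List.range 5).foldl (fun C i =>
    (List.range 5).foldl (fun C j => mset C i j (mget (bComps R) i j)) C) R

-- ===== PRECONDITION & SPEC =====
-- Pre_ excludes exactly the inputs where A raises IndexError: fewer than 5 rows, or one of the
-- first 5 rows shorter than 5.
def Pre_equivalence_closure (R : List (List Int)) : Prop :=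
  5 ≤ R.length ∧ ∀ i < 5, 5 ≤ (rget R i).length
instance (R : List (List Int)) : Decidable (Pre_equivalence_closure R) := by
  unfold Pre_equivalence_closure; infer_instance

def pvWitness_equivalence_closure : List (List Int) :=
  [[0,1,0,0,0],[0,0,0,0,0],[0,0,2,0,0],[0,0,0,0,0],[0,0,0,1,0]]

def Spec_equivalence_closure (R : List (List Int)) (out : List (List Int)) : Prop := out = equivalence_closure_alt R
instance (R : List (List Int)) (out : List (List Int)) : Decidable (Spec_equivalence_closure R out) := by unfold Spec_equivalence_closure; infer_instance

-- ===== CLAIM (what is proved, stated in full; the proofs are below) =====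
def Claim_equal_equivalence_closure : Prop := ∀ (R : List (List Int)), Dom_equivalence_closure R → Pre_equivalence_closure R → Spec_equivalence_closure R (equivalence_closure R)

-- ===== LEMMAS AND PROOFS =====

lemma len_mset (C : List (List Int)) (i j : Nat) (v : Int) : (mset C i j v).length = C.length := by
  simp [mset]

lemma rget_mset_ne {C : List (List Int)} {i a : Nat} (j : Nat) (v : Int) (h : a ≠ i) :
    rget (mset C i j v) a = rget C a := by
  simp [mset, rget, List.getD, List.getElem?_set_ne (Ne.symm h)]

lemma rget_mset_self {C : List (List Int)} {i : Nat} (j : Nat) (v : Int) (hi : i < C.length) :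
    rget (mset C i j v) i = (rget C i).set j v := by
  simp [mset, rget, List.getD, hi]

lemma len_rget_mset (C : List (List Int)) (i j : Nat) (v : Int) (a : Nat) :
    (rget (mset C i j v) a).length = (rget C a).length := by
  by_cases h : a = i
  · subst h
    by_cases hi : a < C.length
    · rw [rget_mset_self j v hi]; simp
    · have : C.set a ((rget C a).set j v) = C := List.set_eq_of_length_le (by omega)
      simp [mset, this]
  · rw [rget_mset_ne j v h]

lemma pre_mset {C : List (List Int)} {i j : Nat} {v : Int}
    (h : Pre_equivalence_closure C) : Pre_equivalence_closure (mset C i j v) := by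
  obtain ⟨h1, h2⟩ := h
  exact ⟨by rw [len_mset]; exact h1, fun a ha => by rw [len_rget_mset]; exact h2 a ha⟩

lemma mget_mset_ne {C : List (List Int)} {i j a b : Nat} {v : Int} (h : ¬(a = i ∧ b = j)) :
    mget (mset C i j v) a b = mget C a b := by
  by_cases hai : a = i
  · subst hai
    have hbj : b ≠ j := fun hb => h ⟨rfl, hb⟩
    by_cases hi : a < C.length
    · rw [mget, rget_mset_self j v hi, mget]
      simp [List.getD, List.getElem?_set_ne (Ne.symm hbj)]
    · have : C.set a ((rget C a).set j v) = C := List.set_eq_of_length_le (by omega)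
      simp [mget, mset, this]
  · rw [mget, rget_mset_ne j v hai, mget]

lemma mget_mset_self {C : List (List Int)} {i j : Nat} {v : Int}
    (hi : i < C.length) (hj : j < (rget C i).length) :
    mget (mset C i j v) i j = v := by
  rw [mget, rget_mset_self j v hi]
  simp [List.getD, hj]

lemma mget_mset5 {C : List (List Int)} {i j a b : Nat} {v : Int}
    (hC : Pre_equivalence_closure C) (hi : i < 5) (hj : j < 5) :
    mget (mset C i j v) a b = if a = i ∧ b = j then v else mget C a b := by
  split_ifs with h
  · obtain ⟨rfl, rfl⟩ := h
    have h1 := hC.1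
    have h2 := hC.2 a hi
    exact mget_mset_self (by omega) (by omega)
  · exact mget_mset_ne h

def OutEq (C D : List (List Int)) : Prop :=
  C.length = D.length ∧ (∀ a, 5 ≤ a → rget C a = rget D a) ∧
  (∀ a, a < 5 → (rget C a).length = (rget D a).length) ∧
  (∀ a b, a < 5 → 5 ≤ b → mget C a b = mget D a b)

lemma outEq_refl (C : List (List Int)) : OutEq C C := ⟨rfl, fun _ _ => rfl, fun _ _ => rfl, fun _ _ _ _ => rfl⟩

lemma outEq_trans {C D E : List (List Int)} (h1 : OutEq C D) (h2 : OutEq D E) : OutEq C E := by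
  obtain ⟨a1, a2, a3, a4⟩ := h1; obtain ⟨b1, b2, b3, b4⟩ := h2
  exact ⟨a1.trans b1, fun a ha => (a2 a ha).trans (b2 a ha),
    fun a ha => (a3 a ha).trans (b3 a ha), fun a b ha hb => (a4 a b ha hb).trans (b4 a b ha hb)⟩

lemma outEq_mset {C : List (List Int)} {i j : Nat} {v : Int} (hi : i < 5) (hj : j < 5) :
    OutEq (mset C i j v) C := by
  refine ⟨len_mset C i j v, fun a ha => rget_mset_ne j v (by omega), fun a _ => len_rget_mset C i j v a,
    fun a b _ hb => mget_mset_ne (by omega)⟩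

lemma foldl_pres {α : Type} {P : List (List Int) → Prop} {f : List (List Int) → α → List (List Int)}
    {l : List α} {C : List (List Int)}
    (h : ∀ C x, x ∈ l → P C → P (f C x)) (hC : P C) : P (l.foldl f C) := by
  induction l generalizing C with
  | nil => exact hC
  | cons x xs ih =>
    exact ih (fun C y hy hP => h C y (List.mem_cons_of_mem _ hy) hP) (h C x List.mem_cons_self hC)


def PO (R C : List (List Int)) : Prop := Pre_equivalence_closure C ∧ OutEq C R

lemma po_mset {R C : List (List Int)} {i j : Nat} {v : Int} (hi : i < 5) (hj : j < 5)
    (h : PO R C) : PO R (mset C i j v) :=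
  ⟨pre_mset h.1, outEq_trans (outEq_mset hi hj) h.2⟩

lemma po_refl {R C : List (List Int)} (h : PO R C) : PO R (reflexive_closure C) := by
  unfold reflexive_closure
  exact foldl_pres (fun C x hx hP => po_mset (List.mem_range.mp hx) (List.mem_range.mp hx) hP) h

lemma po_sym {R C : List (List Int)} {C0 : List (List Int)} (h : PO R C) :
    PO R ((List.range 5).foldl (fun C i => (List.range 5).foldl (fun C j =>
      if mget C0 i j = 1 ∨ mget C0 j i = 1 then mset (mset C i j 1) j i 1 else C) C) C) := by
  refine foldl_pres (fun C i hi hP => ?_) h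
  refine foldl_pres (fun C j hj hP => ?_) hP
  have hi5 := List.mem_range.mp hi
  have hj5 := List.mem_range.mp hj
  split_ifs with hc
  · exact po_mset hj5 hi5 (po_mset hi5 hj5 hP)
  · exact hP

lemma po_transInner {R C : List (List Int)} {k i : Nat} {js : List Nat}
    (hi : i < 5) (hjs : ∀ j ∈ js, j < 5) (h : PO R C) : PO R (transInner k i C js) := by
  unfold transInner
  refine foldl_pres (fun C j hj hP => ?_) h
  split_ifs with hc
  · exact po_mset hi (hjs j hj) hP
  · exact hP

lemma po_transStep {R C : List (List Int)} {k : Nat} (h : PO R C) : PO R (transStep C k) := by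
  unfold transStep
  refine foldl_pres (fun C i hi hP => ?_) h
  split_ifs with hc
  · exact po_transInner (List.mem_range.mp hi) (fun j hj => List.mem_range.mp hj) hP
  · exact hP

lemma po_transFold {R C : List (List Int)} {ks : List Nat} (h : PO R C) :
    PO R (ks.foldl transStep C) :=
  foldl_pres (fun C k _ hP => po_transStep hP) h

lemma po_body {R C : List (List Int)} (h : PO R C) : PO R (eqBody C) := by
  unfold eqBody transitive_closure
  exact po_transFold (po_sym (po_refl h))

lemma po_eqLoop {R C : List (List Int)} (n : Nat) (h : PO R C) : PO R (eqLoop n C) := by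
  induction n generalizing C with
  | zero => exact h
  | succ m ih =>
    simp only [eqLoop]
    split_ifs with hc
    · exact po_body h
    · exact ih (po_body h)

lemma po_A {R : List (List Int)} (h : Pre_equivalence_closure R) : PO R (equivalence_closure R) :=
  po_eqLoop 3 ⟨h, outEq_refl R⟩

lemma po_B {R : List (List Int)} (h : Pre_equivalence_closure R) : PO R (equivalence_closure_alt R) := by
  unfold equivalence_closure_alt
  refine foldl_pres (fun C i hi hP => ?_) (⟨h, outEq_refl R⟩ : PO R R)
  refine foldl_pres (fun C j hj hP => ?_) hP
  exact po_mset (List.mem_range.mp hi) (List.mem_range.mp hj) hP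

lemma refl_go {l : List Nat} (hl : ∀ x ∈ l, x < 5) :
    ∀ {C : List (List Int)}, Pre_equivalence_closure C → ∀ a b, a < 5 → b < 5 →
    mget (l.foldl (fun C i => mset C i i 1) C) a b = if a = b ∧ a ∈ l then 1 else mget C a b := by
  induction l with
  | nil => intro C _ a b _ _; simp
  | cons i xs ih =>
    intro C hC a b ha hb
    have hi5 : i < 5 := hl i List.mem_cons_self
    rw [List.foldl_cons, ih (fun x hx => hl x (List.mem_cons_of_mem _ hx)) (pre_mset hC) a b ha hb]
    rw [mget_mset5 hC hi5 hi5]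
    by_cases hab : a = b
    · subst hab
      by_cases hai : a = i
      · subst hai; simp
      · simp [hai, List.mem_cons]
    · simp only [hab, false_and, if_false]
      rw [if_neg (fun h => hab (h.1.trans h.2.symm))]

lemma mget_refl {C : List (List Int)} (hC : Pre_equivalence_closure C) {a b : Nat}
    (ha : a < 5) (hb : b < 5) :
    mget (reflexive_closure C) a b = if a = b then 1 else mget C a b := by
  unfold reflexive_closure
  rw [refl_go (fun x hx => List.mem_range.mp hx) hC a b ha hb]
  simp [List.mem_range, ha]

lemma sym_inner_go {C0 : List (List Int)} {i : Nat} (hi : i < 5) {js : List Nat}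
    (hjs : ∀ j ∈ js, j < 5) :
    ∀ {cur : List (List Int)}, Pre_equivalence_closure cur → ∀ a b, a < 5 → b < 5 →
    mget (js.foldl (fun C j =>
        if mget C0 i j = 1 ∨ mget C0 j i = 1 then mset (mset C i j 1) j i 1 else C) cur) a b
      = if ∃ j ∈ js, (mget C0 i j = 1 ∨ mget C0 j i = 1) ∧ ((a = i ∧ b = j) ∨ (a = j ∧ b = i))
        then 1 else mget cur a b := by
  induction js with
  | nil => intro cur _ a b _ _; simp
  | cons j rest ih =>
    intro cur hcur a b ha hb
    have hj5 : j < 5 := hjs j List.mem_cons_self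
    have hcur' : Pre_equivalence_closure
        (if mget C0 i j = 1 ∨ mget C0 j i = 1 then mset (mset cur i j 1) j i 1 else cur) := by
      split_ifs
      · exact pre_mset (pre_mset hcur)
      · exact hcur
    rw [List.foldl_cons, ih (fun x hx => hjs x (List.mem_cons_of_mem _ hx)) hcur' a b ha hb]
    by_cases hrest : ∃ x ∈ rest, (mget C0 i x = 1 ∨ mget C0 x i = 1) ∧ ((a = i ∧ b = x) ∨ (a = x ∧ b = i))
    · rw [if_pos hrest, if_pos]
      obtain ⟨x, hx, hcond, hm⟩ := hrest
      exact ⟨x, List.mem_cons_of_mem _ hx, hcond, hm⟩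
    · rw [if_neg hrest]
      by_cases hc : mget C0 i j = 1 ∨ mget C0 j i = 1
      · rw [if_pos hc]
        rw [mget_mset5 (pre_mset hcur) hj5 hi, mget_mset5 hcur hi hj5]
        by_cases hm : (a = i ∧ b = j) ∨ (a = j ∧ b = i)
        · have hex : ∃ x ∈ j :: rest, (mget C0 i x = 1 ∨ mget C0 x i = 1) ∧ ((a = i ∧ b = x) ∨ (a = x ∧ b = i)) :=
            ⟨j, List.mem_cons_self, hc, hm⟩
          rw [if_pos hex]
          rcases hm with ⟨ha1, hb1⟩ | ⟨ha1, hb1⟩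
          · by_cases h2 : a = j ∧ b = i
            · rw [if_pos h2]
            · rw [if_neg h2, if_pos ⟨ha1, hb1⟩]
          · rw [if_pos ⟨ha1, hb1⟩]
        · have hnex : ¬∃ x ∈ j :: rest, (mget C0 i x = 1 ∨ mget C0 x i = 1) ∧ ((a = i ∧ b = x) ∨ (a = x ∧ b = i)) := by
            rintro ⟨x, hx, hcond, hmx⟩
            rcases List.mem_cons.mp hx with rfl | hx'
            · exact hm hmx
            · exact hrest ⟨x, hx', hcond, hmx⟩
          rw [if_neg hnex]
          have h1 : ¬(a = j ∧ b = i) := fun h => hm (Or.inr h)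
          have h2 : ¬(a = i ∧ b = j) := fun h => hm (Or.inl h)
          rw [if_neg h1, if_neg h2]
      · rw [if_neg hc]
        have hnex : ¬∃ x ∈ j :: rest, (mget C0 i x = 1 ∨ mget C0 x i = 1) ∧ ((a = i ∧ b = x) ∨ (a = x ∧ b = i)) := by
          rintro ⟨x, hx, hcond, hmx⟩
          rcases List.mem_cons.mp hx with rfl | hx'
          · exact absurd hcond hc
          · exact hrest ⟨x, hx', hcond, hmx⟩
        rw [if_neg hnex]

lemma sym_outer_go {C0 : List (List Int)} {is : List Nat} (his : ∀ i ∈ is, i < 5) :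
    ∀ {cur : List (List Int)}, Pre_equivalence_closure cur → ∀ a b, a < 5 → b < 5 →
    mget (is.foldl (fun C i => (List.range 5).foldl (fun C j =>
        if mget C0 i j = 1 ∨ mget C0 j i = 1 then mset (mset C i j 1) j i 1 else C) C) cur) a b
      = if ∃ i ∈ is, ∃ j ∈ List.range 5, (mget C0 i j = 1 ∨ mget C0 j i = 1) ∧ ((a = i ∧ b = j) ∨ (a = j ∧ b = i))
        then 1 else mget cur a b := by
  induction is with
  | nil => intro cur _ a b _ _; simp
  | cons i rest ih =>
    intro cur hcur a b ha hb
    have hi5 : i < 5 := his i List.mem_cons_self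
    have hcur' : Pre_equivalence_closure ((List.range 5).foldl (fun C j =>
        if mget C0 i j = 1 ∨ mget C0 j i = 1 then mset (mset C i j 1) j i 1 else C) cur) := by
      refine (foldl_pres (P := PO cur) (fun C j hj hP => ?_) (⟨hcur, outEq_refl cur⟩ : PO cur cur)).1
      split_ifs with hc
      · exact po_mset (List.mem_range.mp hj) hi5 (po_mset hi5 (List.mem_range.mp hj) hP)
      · exact hP
    rw [List.foldl_cons, ih (fun x hx => his x (List.mem_cons_of_mem _ hx)) hcur' a b ha hb]
    rw [sym_inner_go hi5 (fun j hj => List.mem_range.mp hj) hcur a b ha hb]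
    by_cases hrest : ∃ x ∈ rest, ∃ j ∈ List.range 5, (mget C0 x j = 1 ∨ mget C0 j x = 1) ∧ ((a = x ∧ b = j) ∨ (a = j ∧ b = x))
    · rw [if_pos hrest, if_pos]
      obtain ⟨x, hx, hj⟩ := hrest
      exact ⟨x, List.mem_cons_of_mem _ hx, hj⟩
    · rw [if_neg hrest]
      by_cases hhead : ∃ j ∈ List.range 5, (mget C0 i j = 1 ∨ mget C0 j i = 1) ∧ ((a = i ∧ b = j) ∨ (a = j ∧ b = i))
      · rw [if_pos hhead, if_pos ⟨i, List.mem_cons_self, hhead⟩]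
      · rw [if_neg hhead, if_neg]
        rintro ⟨x, hx, hj⟩
        rcases List.mem_cons.mp hx with rfl | hx'
        · exact hhead hj
        · exact hrest ⟨x, hx', hj⟩

lemma mget_sym {C : List (List Int)} (hC : Pre_equivalence_closure C) {a b : Nat}
    (ha : a < 5) (hb : b < 5) :
    mget (symmetric_closure C) a b = if mget C a b = 1 ∨ mget C b a = 1 then 1 else mget C a b := by
  unfold symmetric_closure
  rw [sym_outer_go (fun x hx => List.mem_range.mp hx) hC a b ha hb]
  congr 1
  apply propext
  constructor
  · rintro ⟨i, -, j, -, hcond, hm⟩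
    rcases hm with ⟨rfl, rfl⟩ | ⟨rfl, rfl⟩
    · exact hcond
    · exact hcond.symm
  · intro h
    exact ⟨a, List.mem_range.mpr ha, b, List.mem_range.mpr hb, h, Or.inl ⟨rfl, rfl⟩⟩

lemma trans_inner_go {k i : Nat} (hk : k < 5) (hi : i < 5) {js : List Nat}
    (hjs : ∀ j ∈ js, j < 5) (hnd : js.Nodup) :
    ∀ {cur : List (List Int)}, Pre_equivalence_closure cur → ∀ a b, a < 5 → b < 5 →
    mget (transInner k i cur js) a b
      = if a = i ∧ b ∈ js ∧ mget cur k b ≠ 0 then 1 else mget cur a b := by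
  induction js with
  | nil => intro cur _ a b _ _; simp [transInner]
  | cons j rest ih =>
    intro cur hcur a b ha hb
    have hj5 : j < 5 := hjs j List.mem_cons_self
    have hjr : j ∉ rest := (List.nodup_cons.mp hnd).1
    have hndr : rest.Nodup := (List.nodup_cons.mp hnd).2
    have hcur' : Pre_equivalence_closure (if mget cur k j ≠ 0 then mset cur i j 1 else cur) := by
      split_ifs
      · exact pre_mset hcur
      · exact hcur
    rw [show transInner k i cur (j :: rest)
        = transInner k i (if mget cur k j ≠ 0 then mset cur i j 1 else cur) rest from rfl]
    rw [ih (fun x hx => hjs x (List.mem_cons_of_mem _ hx)) hndr hcur' a b ha hb]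
    have hrowk : ∀ b', b' < 5 → b' ∈ rest →
        mget (if mget cur k j ≠ 0 then mset cur i j 1 else cur) k b' = mget cur k b' := by
      intro b' hb5 hbr
      split_ifs with hg
      · exact mget_mset_ne (fun h => hjr (h.2 ▸ hbr))
      · rfl
    by_cases hrest : a = i ∧ b ∈ rest ∧ mget cur k b ≠ 0
    · rw [if_pos (by
        refine ⟨hrest.1, ?_⟩
        rw [hrowk b hb hrest.2.1]
        exact ⟨hrest.2.1, hrest.2.2⟩), if_pos ⟨hrest.1, List.mem_cons_of_mem _ hrest.2.1, hrest.2.2⟩]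
    · have hneg : ¬(a = i ∧ b ∈ rest ∧ mget (if mget cur k j ≠ 0 then mset cur i j 1 else cur) k b ≠ 0) := by
        rintro ⟨h1, h2, h3⟩
        exact hrest ⟨h1, h2, by rwa [hrowk b hb h2] at h3⟩
      rw [if_neg hneg]
      by_cases hab : a = i ∧ b = j
      · obtain ⟨rfl, rfl⟩ := hab
        by_cases hg : mget cur k b ≠ 0
        · rw [if_pos hg, if_pos ⟨rfl, List.mem_cons_self, hg⟩]
          exact mget_mset_self (by have := hcur.1; omega) (by have := hcur.2 a ha; omega)
        · rw [if_neg hg, if_neg (by rintro ⟨-, -, h3⟩; exact hg h3)]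
      · have : mget (if mget cur k j ≠ 0 then mset cur i j 1 else cur) a b = mget cur a b := by
          split_ifs with hg
          · exact mget_mset_ne hab
          · rfl
        rw [this, if_neg (by
          rintro ⟨rfl, hmem, h3⟩
          rcases List.mem_cons.mp hmem with rfl | hmem'
          · exact hab ⟨rfl, rfl⟩
          · exact hrest ⟨rfl, hmem', h3⟩)]

lemma trans_outer_go {C0 : List (List Int)} {k : Nat} (hk : k < 5) {is : List Nat}
    (his : ∀ i ∈ is, i < 5) :
    ∀ {S : Nat → Bool} {cur : List (List Int)}, Pre_equivalence_closure cur →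
    (∀ a b, a < 5 → b < 5 →
      mget cur a b = if S a = true ∧ mget C0 a k ≠ 0 ∧ mget C0 k b ≠ 0 then 1 else mget C0 a b) →
    ∀ a b, a < 5 → b < 5 →
    mget (is.foldl (fun C i => if mget C i k ≠ 0 then transInner k i C (List.range 5) else C) cur) a b
      = if (S a = true ∨ a ∈ is) ∧ mget C0 a k ≠ 0 ∧ mget C0 k b ≠ 0 then 1 else mget C0 a b := by
  induction is with
  | nil =>
    intro S cur hcur hinv a b ha hb
    rw [List.foldl_nil, hinv a b ha hb]
    simp
  | cons i rest ih =>
    intro S cur hcur hinv a b ha hb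
    have hi5 : i < 5 := his i List.mem_cons_self
    -- the guard is equivalent to the original entry being nonzero
    have hguard : (mget cur i k ≠ 0) ↔ (mget C0 i k ≠ 0) := by
      rw [hinv i k hi5 hk]
      split_ifs with h
      · exact ⟨fun _ => h.2.1, fun _ => one_ne_zero⟩
      · exact Iff.rfl
    have hkrow : ∀ b', b' < 5 → ((mget cur k b' ≠ 0) ↔ (mget C0 k b' ≠ 0)) := by
      intro b' hb5
      rw [hinv k b' hk hb5]
      split_ifs with h
      · exact ⟨fun _ => h.2.2, fun _ => one_ne_zero⟩
      · exact Iff.rfl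
    rw [List.foldl_cons]
    have hstep : ∀ a b, a < 5 → b < 5 →
        mget (if mget cur i k ≠ 0 then transInner k i cur (List.range 5) else cur) a b
          = if (S a = true ∨ a = i) ∧ mget C0 a k ≠ 0 ∧ mget C0 k b ≠ 0 then 1 else mget C0 a b := by
      intro a b ha hb
      by_cases hg : mget cur i k ≠ 0
      · rw [if_pos hg, trans_inner_go hk hi5 (fun x hx => List.mem_range.mp hx) List.nodup_range hcur a b ha hb]
        by_cases hai : a = i
        · subst hai
          by_cases hcb : mget C0 k b ≠ 0
          · rw [if_pos ⟨rfl, List.mem_range.mpr hb, (hkrow b hb).mpr hcb⟩,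
              if_pos ⟨Or.inr rfl, hguard.mp hg, hcb⟩]
          · rw [if_neg (by rintro ⟨-, -, hnz⟩; exact hcb ((hkrow b hb).mp hnz)),
              hinv a b ha hb, if_neg (fun h => hcb h.2.2), if_neg (fun h => hcb h.2.2)]
        · have hiff : (S a = true ∧ mget C0 a k ≠ 0 ∧ mget C0 k b ≠ 0)
              ↔ ((S a = true ∨ a = i) ∧ mget C0 a k ≠ 0 ∧ mget C0 k b ≠ 0) := by
            constructor
            · rintro ⟨h1, h2⟩; exact ⟨Or.inl h1, h2⟩
            · rintro ⟨h1, h2⟩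
              rcases h1 with h1 | h1
              · exact ⟨h1, h2⟩
              · exact absurd h1 hai
          rw [if_neg (fun h => hai h.1), hinv a b ha hb, if_congr hiff rfl rfl]
      · rw [if_neg hg, hinv a b ha hb]
        have hC0 : ¬ mget C0 i k ≠ 0 := fun h => hg (hguard.mpr h)
        by_cases hai : a = i
        · subst hai
          rw [if_neg (fun h => hC0 h.2.1), if_neg (fun h => hC0 h.2.1)]
        · have hiff : (S a = true ∧ mget C0 a k ≠ 0 ∧ mget C0 k b ≠ 0)
              ↔ ((S a = true ∨ a = i) ∧ mget C0 a k ≠ 0 ∧ mget C0 k b ≠ 0) := by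
            constructor
            · rintro ⟨h1, h2⟩; exact ⟨Or.inl h1, h2⟩
            · rintro ⟨h1, h2⟩
              rcases h1 with h1 | h1
              · exact ⟨h1, h2⟩
              · exact absurd h1 hai
          rw [if_congr hiff rfl rfl]
    have hpre' : Pre_equivalence_closure
        (if mget cur i k ≠ 0 then transInner k i cur (List.range 5) else cur) := by
      split_ifs
      · exact (po_transInner (R := cur) hi5 (fun x hx => List.mem_range.mp hx) ⟨hcur, outEq_refl cur⟩).1
      · exact hcur
    rw [ih (fun x hx => his x (List.mem_cons_of_mem _ hx)) (S := fun a => S a || a == i) hpre'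
      (by
        intro a b ha hb
        rw [hstep a b ha hb]
        have hiff : ((S a = true ∨ a = i) ∧ mget C0 a k ≠ 0 ∧ mget C0 k b ≠ 0)
            ↔ ((S a || a == i) = true ∧ mget C0 a k ≠ 0 ∧ mget C0 k b ≠ 0) := by
          constructor
          · rintro ⟨h1, h2⟩
            refine ⟨?_, h2⟩
            rcases h1 with h1 | h1
            · simp [h1]
            · simp [h1]
          · rintro ⟨h1, h2⟩
            refine ⟨?_, h2⟩
            rcases Bool.or_eq_true_iff.mp h1 with h1 | h1
            · exact Or.inl h1
            · exact Or.inr (by simpa using h1)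
        rw [if_congr hiff rfl rfl]) a b ha hb]
    have hiff : (((S a || a == i) = true ∨ a ∈ rest) ∧ mget C0 a k ≠ 0 ∧ mget C0 k b ≠ 0)
        ↔ ((S a = true ∨ a ∈ i :: rest) ∧ mget C0 a k ≠ 0 ∧ mget C0 k b ≠ 0) := by
      constructor
      · rintro ⟨h1, h2⟩
        refine ⟨?_, h2⟩
        rcases h1 with h1 | h1
        · rcases Bool.or_eq_true_iff.mp h1 with h1 | h1
          · exact Or.inl h1
          · exact Or.inr (List.mem_cons.mpr (Or.inl (by simpa using h1)))
        · exact Or.inr (List.mem_cons_of_mem _ h1)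
      · rintro ⟨h1, h2⟩
        refine ⟨?_, h2⟩
        rcases h1 with h1 | h1
        · exact Or.inl (by simp [h1])
        · rcases List.mem_cons.mp h1 with rfl | h1
          · exact Or.inl (by simp)
          · exact Or.inr h1
    rw [if_congr hiff rfl rfl]

lemma mget_transStep {C : List (List Int)} (hC : Pre_equivalence_closure C) {k : Nat} (hk : k < 5)
    {a b : Nat} (ha : a < 5) (hb : b < 5) :
    mget (transStep C k) a b = if mget C a k ≠ 0 ∧ mget C k b ≠ 0 then 1 else mget C a b := by
  unfold transStep
  rw [trans_outer_go (C0 := C) hk (fun x hx => List.mem_range.mp hx) (S := fun _ => false) hC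
    (by intro a b ha hb; simp) a b ha hb]
  have hiff : ((false = true ∨ a ∈ List.range 5) ∧ mget C a k ≠ 0 ∧ mget C k b ≠ 0)
      ↔ (mget C a k ≠ 0 ∧ mget C k b ≠ 0) := by
    simp [List.mem_range, ha]
  rw [if_congr hiff rfl rfl]

lemma tval {ks : List Nat} (hks : ∀ x ∈ ks, x < 5) :
    ∀ {C : List (List Int)}, Pre_equivalence_closure C → ∀ a b, a < 5 → b < 5 →
    mget (ks.foldl transStep C) a b = 1 ∨ mget (ks.foldl transStep C) a b = mget C a b := by
  induction ks with
  | nil => intro C _ a b _ _; right; rfl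
  | cons k rest ih =>
    intro C hC a b ha hb
    have hk5 : k < 5 := hks k List.mem_cons_self
    have hC' : Pre_equivalence_closure (transStep C k) :=
      (po_transStep (R := C) ⟨hC, outEq_refl C⟩).1
    rw [List.foldl_cons]
    rcases ih (fun x hx => hks x (List.mem_cons_of_mem _ hx)) hC' a b ha hb with h | h
    · exact Or.inl h
    · rw [h, mget_transStep hC hk5 ha hb]
      split_ifs
      · exact Or.inl rfl
      · exact Or.inr rfl

lemma tstay1 {ks : List Nat} (hks : ∀ x ∈ ks, x < 5) {C : List (List Int)}
    (hC : Pre_equivalence_closure C) {a b : Nat} (ha : a < 5) (hb : b < 5)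
    (h : mget C a b = 1) : mget (ks.foldl transStep C) a b = 1 := by
  rcases tval hks hC a b ha hb with h' | h'
  · exact h'
  · rw [h', h]

lemma tone {ks : List Nat} (hks : ∀ x ∈ ks, x < 5) {k : Nat} (hkm : k ∈ ks) :
    ∀ {C : List (List Int)}, Pre_equivalence_closure C → ∀ a b, a < 5 → b < 5 →
    mget C a k ≠ 0 → mget C k b ≠ 0 → mget (ks.foldl transStep C) a b = 1 := by
  induction ks with
  | nil => cases hkm
  | cons k' rest ih =>
    intro C hC a b ha hb hak hkb
    have hk5 : k < 5 := hks k hkm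
    have hk'5 : k' < 5 := hks k' List.mem_cons_self
    have hC' : Pre_equivalence_closure (transStep C k') :=
      (po_transStep (R := C) ⟨hC, outEq_refl C⟩).1
    rw [List.foldl_cons]
    by_cases hkk : k' = k
    · subst hkk
      have h1 : mget (transStep C k') a b = 1 := by
        rw [mget_transStep hC hk'5 ha hb, if_pos ⟨hak, hkb⟩]
      exact tstay1 (fun x hx => hks x (List.mem_cons_of_mem _ hx)) hC' ha hb h1
    · have hkm' : k ∈ rest := by
        rcases List.mem_cons.mp hkm with h | h
        · exact absurd h.symm hkk
        · exact h
      have hak' : mget (transStep C k') a k ≠ 0 := by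
        rw [mget_transStep hC hk'5 ha hk5]
        split_ifs
        · exact one_ne_zero
        · exact hak
      have hkb' : mget (transStep C k') k b ≠ 0 := by
        rw [mget_transStep hC hk'5 hk5 hb]
        split_ifs
        · exact one_ne_zero
        · exact hkb
      exact ih (fun x hx => hks x (List.mem_cons_of_mem _ hx)) hkm' hC' a b ha hb hak' hkb'

lemma tsound {K : Nat → Nat → Prop}
    (Ktr : ∀ a k b, a < 5 → k < 5 → b < 5 → K a k → K k b → K a b)
    {ks : List Nat} (hks : ∀ x ∈ ks, x < 5) :
    ∀ {C : List (List Int)}, Pre_equivalence_closure C →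
    (∀ a b, a < 5 → b < 5 → mget C a b ≠ 0 → K a b) →
    ∀ a b, a < 5 → b < 5 → mget (ks.foldl transStep C) a b ≠ 0 → K a b := by
  induction ks with
  | nil => intro C _ h a b ha hb hnz; exact h a b ha hb hnz
  | cons k rest ih =>
    intro C hC h a b ha hb hnz
    have hk5 : k < 5 := hks k List.mem_cons_self
    have hC' : Pre_equivalence_closure (transStep C k) :=
      (po_transStep (R := C) ⟨hC, outEq_refl C⟩).1
    refine ih (fun x hx => hks x (List.mem_cons_of_mem _ hx)) hC' ?_ a b ha hb (by rwa [List.foldl_cons] at hnz)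
    intro a' b' ha' hb' hnz'
    rw [mget_transStep hC hk5 ha' hb'] at hnz'
    by_cases hcond : mget C a' k ≠ 0 ∧ mget C k b' ≠ 0
    · exact Ktr a' k b' ha' hk5 hb' (h a' k ha' hk5 hcond.1) (h k b' hk5 hb' hcond.2)
    · rw [if_neg hcond] at hnz'
      exact h a' b' ha' hb' hnz'

inductive PathB (M : Nat → Nat → Prop) (K : Nat) : Nat → Nat → Prop where
  | single {a b : Nat} : M a b → PathB M K a b
  | cons {a c b : Nat} : M a c → c < K → PathB M K c b → PathB M K a b

lemma pathB_decomp {M : Nat → Nat → Prop} {n a b : Nat} (p : PathB M (n + 1) a b) :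
    PathB M n a b ∨ (PathB M n a n ∧ PathB M n n b) := by
  induction p with
  | single h => exact Or.inl (PathB.single h)
  | @cons a c b h hc p ih =>
    rcases Nat.lt_succ_iff_lt_or_eq.mp hc with hlt | rfl
    · rcases ih with p' | ⟨p1, p2⟩
      · exact Or.inl (PathB.cons h hlt p')
      · exact Or.inr ⟨PathB.cons h hlt p1, p2⟩
    · have pnb : PathB M c c b := by
        rcases ih with p' | ⟨_, p2⟩
        · exact p'
        · exact p2
      exact Or.inr ⟨PathB.single h, pnb⟩

lemma pathB_snoc {M : Nat → Nat → Prop} {K a c b : Nat} (p : PathB M K a c) (h : M c b)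
    (hc : c < K) : PathB M K a b := by
  induction p with
  | single h' => exact PathB.cons h' hc (PathB.single h)
  | cons h' hc' _ ih => exact PathB.cons h' hc' (ih h hc)

lemma warshall {C : List (List Int)} (hC : Pre_equivalence_closure C) :
    ∀ n, n ≤ 5 → ∀ a b, a < 5 → b < 5 →
    PathB (fun x y => x < 5 ∧ y < 5 ∧ mget C x y ≠ 0) n a b →
    mget ((List.range n).foldl transStep C) a b ≠ 0 := by
  intro n
  induction n with
  | zero =>
    intro _ a b ha hb p
    cases p with
    | single h => exact h.2.2
    | cons h hc p => omega
  | succ m ih =>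
    intro hm a b ha hb p
    have hm5 : m < 5 := by omega
    have hCm : Pre_equivalence_closure ((List.range m).foldl transStep C) :=
      (po_transFold (R := C) ⟨hC, outEq_refl C⟩).1
    rw [List.range_succ, List.foldl_append, List.foldl_cons, List.foldl_nil]
    rcases pathB_decomp p with p' | ⟨p1, p2⟩
    · have hnz := ih (by omega) a b ha hb p'
      rw [mget_transStep hCm hm5 ha hb]
      split_ifs
      · exact one_ne_zero
      · exact hnz
    · have h1 := ih (by omega) a m ha hm5 p1
      have h2 := ih (by omega) m b hm5 hb p2
      rw [mget_transStep hCm hm5 ha hb, if_pos ⟨h1, h2⟩]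
      exact one_ne_zero

def eRel (R : List (List Int)) (a b : Nat) : Prop :=
  a < 5 ∧ b < 5 ∧ (mget R a b ≠ 0 ∨ mget R b a ≠ 0)

def conn (R : List (List Int)) (a b : Nat) : Prop := Relation.ReflTransGen (eRel R) a b

lemma eRel_symm {R : List (List Int)} {a b : Nat} (h : eRel R a b) : eRel R b a :=
  ⟨h.2.1, h.1, h.2.2.symm⟩

lemma conn_symm {R : List (List Int)} {a b : Nat} (h : conn R a b) : conn R b a :=
  Relation.ReflTransGen.symmetric (fun _ _ h => eRel_symm h) h

lemma conn_to_path {R : List (List Int)} {M : Nat → Nat → Prop}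
    (hM : ∀ x y, eRel R x y → M x y) {a b : Nat} (h : conn R a b) :
    a = b ∨ PathB M 5 a b := by
  induction h with
  | refl => exact Or.inl rfl
  | @tail c d hac hcd ih =>
    right
    rcases ih with rfl | p
    · exact PathB.single (hM _ _ hcd)
    · exact pathB_snoc p (hM _ _ hcd) hcd.1

lemma pre_srf {C : List (List Int)} (hC : Pre_equivalence_closure C) :
    Pre_equivalence_closure (symmetric_closure (reflexive_closure C)) :=
  (po_sym (C0 := reflexive_closure C) (po_refl (R := C) ⟨hC, outEq_refl C⟩)).1

lemma pre_body {C : List (List Int)} (hC : Pre_equivalence_closure C) :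
    Pre_equivalence_closure (eqBody C) :=
  (po_body (R := C) ⟨hC, outEq_refl C⟩).1

lemma srf_diag {C : List (List Int)} (hC : Pre_equivalence_closure C) {b : Nat} (hb : b < 5) :
    mget (symmetric_closure (reflexive_closure C)) b b = 1 := by
  have hP := (po_refl (R := C) ⟨hC, outEq_refl C⟩).1
  rw [mget_sym hP hb hb, mget_refl hC hb hb, if_pos rfl]
  simp

lemma srf_mono {C : List (List Int)} (hC : Pre_equivalence_closure C) {a b : Nat}
    (ha : a < 5) (hb : b < 5) (h : mget C a b ≠ 0) :
    mget (symmetric_closure (reflexive_closure C)) a b ≠ 0 := by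
  have hP := (po_refl (R := C) ⟨hC, outEq_refl C⟩).1
  rw [mget_sym hP ha hb]
  have hr : mget (reflexive_closure C) a b ≠ 0 := by
    rw [mget_refl hC ha hb]
    split_ifs
    · exact one_ne_zero
    · exact h
  split_ifs with hcond
  · exact one_ne_zero
  · exact hr

lemma srf_sym1 {C : List (List Int)} (hC : Pre_equivalence_closure C) {a b : Nat}
    (ha : a < 5) (hb : b < 5) (h : mget C a b = 1) :
    mget (symmetric_closure (reflexive_closure C)) b a = 1 := by
  have hP := (po_refl (R := C) ⟨hC, outEq_refl C⟩).1
  have hab : mget (reflexive_closure C) a b = 1 := by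
    rw [mget_refl hC ha hb]
    split_ifs <;> simp [h]
  rw [mget_sym hP hb ha, if_pos (Or.inr hab)]

lemma srf_sound {C : List (List Int)} (hC : Pre_equivalence_closure C) {a b : Nat}
    (ha : a < 5) (hb : b < 5) (h : mget (symmetric_closure (reflexive_closure C)) a b ≠ 0) :
    a = b ∨ mget C a b ≠ 0 ∨ mget C b a ≠ 0 := by
  have hP := (po_refl (R := C) ⟨hC, outEq_refl C⟩).1
  rw [mget_sym hP ha hb] at h
  by_cases hcond : mget (reflexive_closure C) a b = 1 ∨ mget (reflexive_closure C) b a = 1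
  · rcases hcond with h1 | h1
    · rw [mget_refl hC ha hb] at h1
      by_cases hab : a = b
      · exact Or.inl hab
      · rw [if_neg hab] at h1
        exact Or.inr (Or.inl (by rw [h1]; exact one_ne_zero))
    · rw [mget_refl hC hb ha] at h1
      by_cases hab : b = a
      · exact Or.inl hab.symm
      · rw [if_neg hab] at h1
        exact Or.inr (Or.inr (by rw [h1]; exact one_ne_zero))
  · rw [if_neg hcond] at h
    rw [mget_refl hC ha hb] at h
    by_cases hab : a = b
    · exact Or.inl hab
    · rw [if_neg hab] at h
      exact Or.inr (Or.inl h)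

lemma range5_lt : ∀ x ∈ List.range 5, x < 5 := fun x hx => List.mem_range.mp hx

lemma body01 {C : List (List Int)} (hC : Pre_equivalence_closure C) {a b : Nat}
    (ha : a < 5) (hb : b < 5) : mget (eqBody C) a b = 0 ∨ mget (eqBody C) a b = 1 := by
  have hP := pre_srf hC
  show mget ((List.range 5).foldl transStep (symmetric_closure (reflexive_closure C))) a b = 0 ∨ _ = 1
  by_cases hz : mget (symmetric_closure (reflexive_closure C)) a b ≠ 0
  · exact Or.inr (tone range5_lt (List.mem_range.mpr hb) hP a b ha hb hz
      (by rw [srf_diag hC hb]; exact one_ne_zero))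
  · rcases tval range5_lt hP a b ha hb with h | h
    · exact Or.inr h
    · rw [h]
      rw [not_not] at hz
      exact Or.inl hz

lemma body_growth {C : List (List Int)} (hC : Pre_equivalence_closure C) {a b : Nat}
    (ha : a < 5) (hb : b < 5) (h : mget C a b ≠ 0) : mget (eqBody C) a b = 1 :=
  tone range5_lt (List.mem_range.mpr hb) (pre_srf hC) a b ha hb (srf_mono hC ha hb h)
    (by rw [srf_diag hC hb]; exact one_ne_zero)

lemma body_diag {C : List (List Int)} (hC : Pre_equivalence_closure C) {a : Nat} (ha : a < 5) :
    mget (eqBody C) a a = 1 :=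
  tone range5_lt (List.mem_range.mpr ha) (pre_srf hC) a a ha ha
    (by rw [srf_diag hC ha]; exact one_ne_zero) (by rw [srf_diag hC ha]; exact one_ne_zero)

lemma body_sound {K : Nat → Nat → Prop}
    (Krefl : ∀ a, a < 5 → K a a) (Ksym : ∀ a b, a < 5 → b < 5 → K a b → K b a)
    (Ktr : ∀ a k b, a < 5 → k < 5 → b < 5 → K a k → K k b → K a b)
    {C : List (List Int)} (hC : Pre_equivalence_closure C)
    (hCK : ∀ a b, a < 5 → b < 5 → mget C a b ≠ 0 → K a b) :
    ∀ a b, a < 5 → b < 5 → mget (eqBody C) a b ≠ 0 → K a b := by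
  intro a b ha hb h
  rw [show eqBody C = (List.range 5).foldl transStep (symmetric_closure (reflexive_closure C)) from rfl] at h
  refine tsound Ktr range5_lt (pre_srf hC) ?_ a b ha hb h
  intro a b ha hb hnz
  rcases srf_sound hC ha hb hnz with rfl | h | h
  · exact Krefl a ha
  · exact hCK a b ha hb h
  · exact Ksym b a hb ha (hCK b a hb ha h)

lemma conn_edge {R : List (List Int)} {a b : Nat} (ha : a < 5) (hb : b < 5)
    (h : mget R a b ≠ 0) : conn R a b :=
  Relation.ReflTransGen.single ⟨ha, hb, Or.inl h⟩

lemma body2_complete {R : List (List Int)} (hR : Pre_equivalence_closure R) {a b : Nat}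
    (ha : a < 5) (hb : b < 5) (h : conn R a b) : mget (eqBody (eqBody R)) a b = 1 := by
  have hM1 : Pre_equivalence_closure (eqBody R) := pre_body hR
  have hedge : ∀ x y, eRel R x y →
      (x < 5 ∧ y < 5 ∧ mget (symmetric_closure (reflexive_closure (eqBody R))) x y ≠ 0) := by
    rintro x y ⟨hx, hy, hor | hor⟩
    · exact ⟨hx, hy, srf_mono hM1 hx hy (by rw [body_growth hR hx hy hor]; exact one_ne_zero)⟩
    · refine ⟨hx, hy, ?_⟩
      rw [srf_sym1 hM1 hy hx (body_growth hR hy hx hor)]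
      exact one_ne_zero
  rcases conn_to_path hedge h with rfl | p
  · exact body_diag hM1 ha
  · have hnz : mget ((List.range 5).foldl transStep
        (symmetric_closure (reflexive_closure (eqBody R)))) a b ≠ 0 :=
      warshall (pre_srf hM1) 5 le_rfl a b ha hb p
    rcases body01 hM1 ha hb with h0 | h1
    · exact absurd (show mget (eqBody (eqBody R)) a b ≠ 0 from hnz) (by rw [h0]; simp)
    · exact h1

lemma eqLoop_succ (n : Nat) (C : List (List Int)) :
    eqLoop (n + 1) C = if eqBody C = C then eqBody C else eqLoop n (eqBody C) := rfl

lemma A_char {R : List (List Int)} (hR : Pre_equivalence_closure R) :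
    ∀ a b, a < 5 → b < 5 →
    (mget (equivalence_closure R) a b ≠ 0 ↔ conn R a b) ∧
    (mget (equivalence_closure R) a b = 0 ∨ mget (equivalence_closure R) a b = 1) := by
  intro a b ha hb
  have hM1 : Pre_equivalence_closure (eqBody R) := pre_body hR
  have hM2 : Pre_equivalence_closure (eqBody (eqBody R)) := pre_body hM1
  have Krefl : ∀ a, a < 5 → conn R a a := fun _ _ => Relation.ReflTransGen.refl
  have Ksym : ∀ a b, a < 5 → b < 5 → conn R a b → conn R b a := fun _ _ _ _ h => conn_symm h
  have Ktr : ∀ a k b, a < 5 → k < 5 → b < 5 → conn R a k → conn R k b → conn R a b :=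
    fun _ _ _ _ _ _ h1 h2 => h1.trans h2
  have hedgeR : ∀ a b, a < 5 → b < 5 → mget R a b ≠ 0 → conn R a b :=
    fun _ _ ha hb h => conn_edge ha hb h
  have sound1 := body_sound Krefl Ksym Ktr hR hedgeR
  have sound2 := body_sound Krefl Ksym Ktr hM1 sound1
  have sound3 := body_sound Krefl Ksym Ktr hM2 sound2
  have hred : equivalence_closure R
      = (if eqBody R = R then eqBody R else eqLoop 2 (eqBody R)) := by
    show eqLoop 3 R = _
    rw [show (3 : Nat) = 2 + 1 from rfl, eqLoop_succ]
  rw [hred]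
  split_ifs with h1
  · constructor
    · constructor
      · exact sound1 a b ha hb
      · intro hc
        have h2 := body2_complete hR ha hb hc
        rw [h1] at h2
        rw [h2]
        exact one_ne_zero
    · exact body01 hR ha hb
  · have hred2 : eqLoop 2 (eqBody R)
        = (if eqBody (eqBody R) = eqBody R then eqBody (eqBody R) else eqLoop 1 (eqBody (eqBody R))) := by
      rw [show (2 : Nat) = 1 + 1 from rfl, eqLoop_succ]
    rw [hred2]
    split_ifs with h2
    · exact ⟨⟨sound2 a b ha hb, fun hc => by rw [body2_complete hR ha hb hc]; exact one_ne_zero⟩,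
        body01 hM1 ha hb⟩
    · have hred3 : eqLoop 1 (eqBody (eqBody R)) = eqBody (eqBody (eqBody R)) := by
        rw [show (1 : Nat) = 0 + 1 from rfl, eqLoop_succ]
        split_ifs <;> rfl
      rw [hred3]
      refine ⟨⟨sound3 a b ha hb, fun hc => ?_⟩, body01 hM2 ha hb⟩
      rw [body_growth hM2 ha hb (by rw [body2_complete hR ha hb hc]; exact one_ne_zero)]
      exact one_ne_zero

def reachB (R : List (List Int)) : Nat → Nat → Nat → Prop
  | 0, i, j => j = i
  | (t+1), i, j => reachB R t i j ∨ ∃ v, v < 5 ∧ reachB R t i v ∧ (mget R v j ≠ 0 ∨ mget R j v ≠ 0)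

lemma reach_mono {R : List (List Int)} {t i j : Nat} (h : reachB R t i j) : reachB R (t+1) i j :=
  Or.inl h

lemma reach_le {R : List (List Int)} {t t' i j : Nat} (ht : t ≤ t') (h : reachB R t i j) :
    reachB R t' i j := by
  induction t' with
  | zero => rwa [Nat.le_zero.mp ht] at h
  | succ m ih =>
    rcases Nat.le_succ_iff.mp ht with h' | rfl
    · exact reach_mono (ih h')
    · exact h

lemma reach_det {R : List (List Int)} {i t t' : Nat}
    (h : ∀ x, x < 5 → (reachB R t i x ↔ reachB R t' i x)) :
    ∀ j, j < 5 → (reachB R (t+1) i j ↔ reachB R (t'+1) i j) := by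
  intro j hj
  show (reachB R t i j ∨ _) ↔ (reachB R t' i j ∨ _)
  apply or_congr (h j hj)
  constructor
  · rintro ⟨v, hv, hr, he⟩; exact ⟨v, hv, (h v hv).mp hr, he⟩
  · rintro ⟨v, hv, hr, he⟩; exact ⟨v, hv, (h v hv).mpr hr, he⟩

lemma reach_fix {R : List (List Int)} {i t : Nat}
    (h : ∀ x, x < 5 → (reachB R t i x ↔ reachB R (t+1) i x)) :
    ∀ m, ∀ x, x < 5 → (reachB R (t+m) i x ↔ reachB R t i x) := by
  intro m
  induction m with
  | zero => intro x _; rfl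
  | succ k ih =>
    intro x hx
    have h2 : ∀ y, y < 5 → (reachB R (t+k) i y ↔ reachB R t i y) := ih
    have h3 := reach_det h2 x hx
    rw [show t + (k+1) = (t+k) + 1 from rfl]
    exact h3.trans (h x hx).symm

lemma reach_45 {R : List (List Int)} {i : Nat} (hi : i < 5) :
    ∀ x, x < 5 → (reachB R 5 i x ↔ reachB R 4 i x) := by
  classical
  by_contra hne
  have hstep : ∀ t, t ≤ 4 → ¬ (∀ x, x < 5 → (reachB R t i x ↔ reachB R (t+1) i x)) := by
    intro t ht hfix
    apply hne
    intro x hx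
    have h1 := reach_fix hfix (5 - t) x hx
    have h2 := reach_fix hfix (4 - t) x hx
    rw [show t + (5 - t) = 5 from by omega] at h1
    rw [show t + (4 - t) = 4 from by omega] at h2
    exact h1.trans h2.symm
  have hmono : ∀ t, (Finset.range 5).filter (fun x => reachB R t i x)
      ⊆ (Finset.range 5).filter (fun x => reachB R (t+1) i x) := by
    intro t x hx
    rw [Finset.mem_filter] at hx ⊢
    exact ⟨hx.1, reach_mono hx.2⟩
  have hne' : ∀ t, t ≤ 4 → (Finset.range 5).filter (fun x => reachB R t i x)
      ≠ (Finset.range 5).filter (fun x => reachB R (t+1) i x) := by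
    intro t ht heq
    refine hstep t ht (fun x hx => ?_)
    constructor
    · intro h
      have : x ∈ (Finset.range 5).filter (fun x => reachB R t i x) :=
        Finset.mem_filter.mpr ⟨Finset.mem_range.mpr hx, h⟩
      rw [heq] at this
      exact (Finset.mem_filter.mp this).2
    · intro h
      have : x ∈ (Finset.range 5).filter (fun x => reachB R (t+1) i x) :=
        Finset.mem_filter.mpr ⟨Finset.mem_range.mpr hx, h⟩
      rw [← heq] at this
      exact (Finset.mem_filter.mp this).2
  have hcard : ∀ t, t ≤ 5 → t + 1 ≤ ((Finset.range 5).filter (fun x => reachB R t i x)).card := by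
    intro t
    induction t with
    | zero =>
      intro _
      have : i ∈ (Finset.range 5).filter (fun x => reachB R 0 i x) :=
        Finset.mem_filter.mpr ⟨Finset.mem_range.mpr hi, rfl⟩
      have := Finset.card_pos.mpr ⟨i, this⟩
      omega
    | succ k ih =>
      intro hk
      have hss : (Finset.range 5).filter (fun x => reachB R k i x)
          ⊂ (Finset.range 5).filter (fun x => reachB R (k+1) i x) :=
        (Finset.ssubset_iff_subset_ne).mpr ⟨hmono k, hne' k (by omega)⟩
      have := Finset.card_lt_card hss
      have := ih (by omega)
      omega
  have h5 := hcard 5 le_rfl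
  have hle : ((Finset.range 5).filter (fun x => reachB R 5 i x)).card ≤ 5 := by
    calc ((Finset.range 5).filter (fun x => reachB R 5 i x)).card
        ≤ (Finset.range 5).card := Finset.card_filter_le _ _
      _ = 5 := Finset.card_range 5
  omega

lemma reach_sound {R : List (List Int)} : ∀ (t : Nat) {i j : Nat}, i < 5 → j < 5 →
    reachB R t i j → conn R i j := by
  intro t
  induction t with
  | zero =>
    intro i j _ _ h
    rw [h]
    exact Relation.ReflTransGen.refl
  | succ m ih =>
    intro i j hi hj h
    rcases h with h | ⟨v, hv, hr, he⟩
    · exact ih hi hj h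
    · exact Relation.ReflTransGen.tail (ih hi hv hr) ⟨hv, hj, he⟩

lemma reach_complete {R : List (List Int)} {i : Nat} (hi : i < 5) :
    ∀ {j : Nat}, conn R i j → j < 5 → reachB R 4 i j := by
  intro j h
  induction h with
  | refl => intro _; exact reach_le (by omega) (show reachB R 0 i i from rfl)
  | @tail c d hic hcd ih =>
    intro hd
    have hc5 : c < 5 := hcd.1
    have h5 : reachB R 5 i d := Or.inr ⟨c, hc5, ih hc5, hcd.2.2⟩
    exact (reach_45 hi d hd).mp h5

lemma bStep_getD {R : List (List Int)} {seen : List Int} {j : Nat} (hj : j < 5) :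
    (bStep R seen).getD j 0
      = if (seen.getD j 0 ≠ 0 ∨ ∃ v ∈ List.range 5, seen.getD v 0 ≠ 0 ∧ (mget R v j ≠ 0 ∨ mget R j v ≠ 0))
        then 1 else 0 := by
  unfold bStep
  rw [List.getD_eq_getElem?_getD, List.getElem?_map, List.getElem?_range hj]
  rfl

lemma s0_getD {i j : Nat} (hi : i < 5) (hj : j < 5) :
    (((List.replicate 5 (0 : Int)).set i 1).getD j 0) = if j = i then 1 else 0 := by
  rw [List.getD_eq_getElem?_getD]
  by_cases h : j = i
  · subst h
    rw [List.getElem?_set_self (by simpa using hj)]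
    simp [hj]
  · rw [List.getElem?_set_ne (Ne.symm h)]
    rw [if_neg h]
    interval_cases j <;> rfl

lemma iter_succ {R : List (List Int)} (t : Nat) (s : List Int) :
    (List.range (t+1)).foldl (fun s _ => bStep R s) s
      = bStep R ((List.range t).foldl (fun s _ => bStep R s) s) := by
  rw [List.range_succ, List.foldl_append, List.foldl_cons, List.foldl_nil]

lemma bIter_spec {R : List (List Int)} {i : Nat} (hi : i < 5) :
    ∀ (t : Nat) (j : Nat), j < 5 →
    (((List.range t).foldl (fun s _ => bStep R s) ((List.replicate 5 0).set i 1)).getD j 0 = 1 ∨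
     ((List.range t).foldl (fun s _ => bStep R s) ((List.replicate 5 0).set i 1)).getD j 0 = 0) ∧
    (((List.range t).foldl (fun s _ => bStep R s) ((List.replicate 5 0).set i 1)).getD j 0 ≠ 0
      ↔ reachB R t i j) := by
  intro t
  induction t with
  | zero =>
    intro j hj
    rw [List.range_zero, List.foldl_nil, s0_getD hi hj]
    constructor
    · split_ifs
      · exact Or.inl rfl
      · exact Or.inr rfl
    · split_ifs with h
      · simp [h, reachB]
      · simp [h, reachB]
  | succ m ih =>
    intro j hj
    rw [iter_succ, bStep_getD hj]
    have hcond : (((List.range m).foldl (fun s _ => bStep R s) ((List.replicate 5 0).set i 1)).getD j 0 ≠ 0 ∨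
        ∃ v ∈ List.range 5, ((List.range m).foldl (fun s _ => bStep R s) ((List.replicate 5 0).set i 1)).getD v 0 ≠ 0
          ∧ (mget R v j ≠ 0 ∨ mget R j v ≠ 0)) ↔ reachB R (m+1) i j := by
      constructor
      · rintro (h | ⟨v, hv, hnz, he⟩)
        · exact Or.inl ((ih j hj).2.mp h)
        · exact Or.inr ⟨v, List.mem_range.mp hv, ((ih v (List.mem_range.mp hv)).2.mp hnz), he⟩
      · rintro (h | ⟨v, hv, hr, he⟩)
        · exact Or.inl ((ih j hj).2.mpr h)
        · exact Or.inr ⟨v, List.mem_range.mpr hv, (ih v hv).2.mpr hr, he⟩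
    constructor
    · split_ifs
      · exact Or.inl rfl
      · exact Or.inr rfl
    · split_ifs with h
      · simpa using hcond.mp h
      · constructor
        · intro h'; exact absurd rfl h'
        · intro hr; exact absurd (hcond.mpr hr) h
  
lemma wr_inner {i : Nat} (hi : i < 5) {w : Nat → Nat → Int} {js : List Nat}
    (hjs : ∀ j ∈ js, j < 5) :
    ∀ {cur : List (List Int)}, Pre_equivalence_closure cur → ∀ a b, a < 5 → b < 5 →
    mget (js.foldl (fun C j => mset C i j (w i j)) cur) a b
      = if a = i ∧ b ∈ js then w i b else mget cur a b := by
  induction js with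
  | nil => intro cur _ a b _ _; simp
  | cons j rest ih =>
    intro cur hcur a b ha hb
    have hj5 : j < 5 := hjs j List.mem_cons_self
    rw [List.foldl_cons, ih (fun x hx => hjs x (List.mem_cons_of_mem _ hx)) (pre_mset hcur) a b ha hb]
    rw [mget_mset5 hcur hi hj5]
    by_cases hrest : a = i ∧ b ∈ rest
    · rw [if_pos hrest, if_pos ⟨hrest.1, List.mem_cons_of_mem _ hrest.2⟩]
    · rw [if_neg hrest]
      by_cases hab : a = i ∧ b = j
      · rw [if_pos hab, if_pos ⟨hab.1, List.mem_cons.mpr (Or.inl hab.2)⟩, hab.2]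
      · rw [if_neg hab, if_neg (by
          rintro ⟨rfl, hmem⟩
          rcases List.mem_cons.mp hmem with rfl | hmem'
          · exact hab ⟨rfl, rfl⟩
          · exact hrest ⟨rfl, hmem'⟩)]

lemma wr_outer {w : Nat → Nat → Int} {is : List Nat} (his : ∀ i ∈ is, i < 5) :
    ∀ {cur : List (List Int)}, Pre_equivalence_closure cur → ∀ a b, a < 5 → b < 5 →
    mget (is.foldl (fun C i => (List.range 5).foldl (fun C j => mset C i j (w i j)) C) cur) a b
      = if a ∈ is then w a b else mget cur a b := by
  induction is with
  | nil => intro cur _ a b _ _; simp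
  | cons i rest ih =>
    intro cur hcur a b ha hb
    have hi5 : i < 5 := his i List.mem_cons_self
    have hcur' : Pre_equivalence_closure ((List.range 5).foldl (fun C j => mset C i j (w i j)) cur) :=
      (foldl_pres (P := PO cur) (fun C j hj hP => po_mset hi5 (List.mem_range.mp hj) hP)
        (⟨hcur, outEq_refl cur⟩ : PO cur cur)).1
    rw [List.foldl_cons, ih (fun x hx => his x (List.mem_cons_of_mem _ hx)) hcur' a b ha hb]
    by_cases hrest : a ∈ rest
    · rw [if_pos hrest, if_pos (List.mem_cons_of_mem _ hrest)]
    · rw [if_neg hrest, wr_inner hi5 (fun x hx => List.mem_range.mp hx) hcur a b ha hb]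
      by_cases hai : a = i
      · subst hai
        rw [if_pos ⟨rfl, List.mem_range.mpr hb⟩, if_pos List.mem_cons_self]
      · rw [if_neg (fun h => hai h.1), if_neg (by
          intro h
          rcases List.mem_cons.mp h with rfl | h'
          · exact hai rfl
          · exact hrest h')]

lemma bComps_row {R : List (List Int)} {a : Nat} (ha : a < 5) :
    rget (bComps R) a = bSat R ((List.replicate 5 0).set a 1) := by
  unfold bComps rget
  rw [List.getD_eq_getElem?_getD, List.getElem?_map, List.getElem?_range ha]
  rfl

lemma B_char {R : List (List Int)} (hR : Pre_equivalence_closure R) :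
    ∀ a b, a < 5 → b < 5 →
    (mget (equivalence_closure_alt R) a b ≠ 0 ↔ conn R a b) ∧
    (mget (equivalence_closure_alt R) a b = 0 ∨ mget (equivalence_closure_alt R) a b = 1) := by
  intro a b ha hb
  have hval : mget (equivalence_closure_alt R) a b = mget (bComps R) a b := by
    unfold equivalence_closure_alt
    rw [wr_outer (w := fun i j => mget (bComps R) i j) (fun x hx => List.mem_range.mp hx) hR a b ha hb,
      if_pos (List.mem_range.mpr ha)]
  have hv2 : mget (bComps R) a b
      = ((List.range 4).foldl (fun s _ => bStep R s) ((List.replicate 5 0).set a 1)).getD b 0 := by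
    rw [mget, bComps_row ha]
    rfl
  have hspec := bIter_spec (R := R) ha 4 b hb
  rw [hval, hv2]
  refine ⟨?_, ?_⟩
  · rw [hspec.2]
    constructor
    · exact fun h => reach_sound 4 ha hb h
    · exact fun h => reach_complete ha h hb
  · rcases hspec.1 with h | h
    · exact Or.inr h
    · exact Or.inl h

lemma matEq {R C D : List (List Int)} (hR : Pre_equivalence_closure R)
    (h1 : OutEq C R) (h2 : OutEq D R)
    (hblock : ∀ a b, a < 5 → b < 5 → mget C a b = mget D a b) : C = D := by
  have hlen : C.length = D.length := h1.1.trans h2.1.symm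
  apply List.ext_getElem hlen
  intro n hn1 hn2
  have hrow : rget C n = C[n] := by
    rw [rget, List.getD_eq_getElem?_getD, List.getElem?_eq_getElem hn1]
    rfl
  have hrow2 : rget D n = D[n] := by
    rw [rget, List.getD_eq_getElem?_getD, List.getElem?_eq_getElem hn2]
    rfl
  by_cases hn5 : n < 5
  · rw [← hrow, ← hrow2]
    have hlr : (rget C n).length = (rget D n).length :=
      (h1.2.2.1 n hn5).trans (h2.2.2.1 n hn5).symm
    apply List.ext_getElem hlr
    intro m hm1 hm2
    have hc : (rget C n)[m] = mget C n m := by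
      rw [mget, List.getD_eq_getElem?_getD, List.getElem?_eq_getElem hm1]
      rfl
    have hd : (rget D n)[m] = mget D n m := by
      rw [mget, List.getD_eq_getElem?_getD, List.getElem?_eq_getElem hm2]
      rfl
    rw [hc, hd]
    by_cases hm5 : m < 5
    · exact hblock n m hn5 hm5
    · exact (h1.2.2.2 n m hn5 (by omega)).trans (h2.2.2.2 n m hn5 (by omega)).symm
  · rw [← hrow, ← hrow2, h1.2.1 n (by omega), h2.2.1 n (by omega)]

-- ===== VERDICT (by name: the statement is the Claim_ definition above) =====
theorem equivalence_closure_spec : Claim_equal_equivalence_closure := by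
  intro R _hDom hPre
  unfold Spec_equivalence_closure
  refine matEq hPre (po_A hPre).2 (po_B hPre).2 ?_
  intro a b ha hb
  obtain ⟨hiffA, h01A⟩ := A_char hPre a b ha hb
  obtain ⟨hiffB, h01B⟩ := B_char hPre a b ha hb
  by_cases hc : conn R a b
  · have hA : mget (equivalence_closure R) a b = 1 := by
      rcases h01A with h | h
      · exact absurd hc (by rw [← hiffA, h]; simp)
      · exact h
    have hB : mget (equivalence_closure_alt R) a b = 1 := by
      rcases h01B with h | h
      · exact absurd hc (by rw [← hiffB, h]; simp)
      · exact h
    rw [hA, hB]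
  · have hA : mget (equivalence_closure R) a b = 0 := by
      by_contra h
      exact hc (hiffA.mp h)
    have hB : mget (equivalence_closure_alt R) a b = 0 := by
      by_contra h
      exact hc (hiffB.mp h)
    rw [hA, hB]
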